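-- pv_equiv track=rewrite | github.com/lsst-sqre/sasquatch | src/sasquatch/line_protocol.py | _iter_tag_ranges
-- ===== SOURCE A (Python) =====
-- from collections.abc import Callable, Iterator
--
-- def _iter_tag_ranges(
--     series_key: str,
--     start_index: int,
-- ) -> Iterator[tuple[int, int, int]]:
--     """Yield tag slice boundaries and key/value separator positions."""
--     series_length = len(series_key)
--     tag_start = start_index
--
--     while tag_start < series_length:
--         index = tag_start
--         escaped = False
--         separator_index = -1
--
--         while index < series_length:
--             char = series_key[index]
--             if escaped:
--                 escaped = False
--             elif char == "\\":
--                 escaped = True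
--             elif char == "=" and separator_index == -1:
--                 separator_index = index
--             elif char == ",":
--                 break
--             index += 1
--
--         yield tag_start, index, separator_index
--         tag_start = index + 1
-- ===== SOURCE B (Python) =====
-- def _iter_tag_ranges(series_key, start_index):
--     """Yield tag slice boundaries and key/value separator positions.
--
--     Single flat left-to-right scan instead of nested while loops: running
--     state (tag_start, separator_index, escaped); yield on each unescaped
--     comma, plus one trailing segment when the scan did not end on a comma.
--     """
--     series_length = len(series_key)
--     tag_start = start_index
--     separator_index = -1
--     escaped = False
--
--     for index in range(start_index, series_length):
--         char = series_key[index]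
--         if escaped:
--             escaped = False
--         elif char == "\\":
--             escaped = True
--         elif char == "=" and separator_index == -1:
--             separator_index = index
--         elif char == ",":
--             yield tag_start, index, separator_index
--             tag_start = index + 1
--             separator_index = -1
--
--     if tag_start < series_length:
--         yield tag_start, series_length, separator_index
-- ===== Notes on version B (the rewrite author's own statement) =====
-- stated objective: simpler
-- what changed: Replaced A's nested while loops (an inner character scan restarted per tag segment) with a single flat left-to-right for-loop over the index range that keeps running state (tag_start, separator_index, escaped), yields on each unescaped comma, and emits one trailing segment after the loop.
import Mathlib
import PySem

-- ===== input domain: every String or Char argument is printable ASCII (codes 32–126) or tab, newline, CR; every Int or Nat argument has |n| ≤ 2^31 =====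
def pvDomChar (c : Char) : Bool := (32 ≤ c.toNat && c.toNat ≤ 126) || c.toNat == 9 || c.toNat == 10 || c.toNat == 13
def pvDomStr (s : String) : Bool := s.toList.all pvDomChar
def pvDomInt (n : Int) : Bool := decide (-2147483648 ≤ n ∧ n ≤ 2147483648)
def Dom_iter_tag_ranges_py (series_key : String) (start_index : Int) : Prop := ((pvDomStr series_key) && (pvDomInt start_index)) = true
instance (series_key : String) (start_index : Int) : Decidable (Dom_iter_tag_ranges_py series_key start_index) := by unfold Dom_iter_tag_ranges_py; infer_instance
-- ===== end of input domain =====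

-- B replaces A's nested while loops by one flat scan with running state (simpler decomposition,
-- same O(n) cost); equivalence is proved on Pre_ = exactly the inputs where A returns (no IndexError).

-- ===== PORT A =====
-- inner while loop of A: scans from `index` with state (escaped, separator_index);
-- returns (index, separator_index) at the break / loop exit.  The Nat `fuel` is the
-- exact loop bound (series_length - index).toNat supplied at the call site (structural
-- recursion replacing the while-loop; with that fuel the 0 case is exactly index >= length).
-- `pyGet? = none` is where Python raises IndexError (excluded by Pre_); we stop there.
def pvInnerA (s : List Char) (fuel : Nat) (index : Int) (escaped : Bool) (sep : Int) :
    Int × Int :=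
  match fuel with
  | 0 => (index, sep)
  | .succ f =>
    if index < (s.length : Int) then
      match PySem.List.pyGet? s index with
      | none => (index, sep)
      | some c =>
        if escaped then pvInnerA s f (index + 1) false sep
        else if c = '\\' then pvInnerA s f (index + 1) true sep
        else if c = '=' ∧ sep = -1 then pvInnerA s f (index + 1) escaped index
        else if c = ',' then (index, sep)
        else pvInnerA s f (index + 1) escaped sep
    else (index, sep)

-- outer while loop of A, same exact-fuel scheme (tag_start strictly increases each round)
def pvOuterA (s : List Char) (fuel : Nat) (tag_start : Int) : List (Int × Int × Int) :=
  match fuel with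
  | 0 => []
  | .succ f =>
    if tag_start < (s.length : Int) then
      (tag_start, (pvInnerA s ((s.length : Int) - tag_start).toNat tag_start false (-1)).1,
        (pvInnerA s ((s.length : Int) - tag_start).toNat tag_start false (-1)).2) ::
        pvOuterA s f
          ((pvInnerA s ((s.length : Int) - tag_start).toNat tag_start false (-1)).1 + 1)
    else []

def iter_tag_ranges_py (series_key : String) (start_index : Int) : List (Int × Int × Int) :=
  pvOuterA series_key.toList ((series_key.toList.length : Int) - start_index).toNat start_index

-- ===== PORT B =====
-- loop body of B's single for-loop; state = (tag_start, separator_index, escaped, yielded).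
-- `pyGet? = none` is where Python raises IndexError (excluded by Pre_); we leave the state unchanged.
def pvStepB (s : List Char) (st : Int × Int × Bool × List (Int × Int × Int)) (index : Int) :
    Int × Int × Bool × List (Int × Int × Int) :=
  match PySem.List.pyGet? s index with
  | none => st
  | some c =>
    if st.2.2.1 then (st.1, st.2.1, false, st.2.2.2)
    else if c = '\\' then (st.1, st.2.1, true, st.2.2.2)
    else if c = '=' ∧ st.2.1 = -1 then (st.1, index, st.2.2.1, st.2.2.2)
    else if c = ',' then (index + 1, -1, st.2.2.1, st.2.2.2 ++ [(st.1, index, st.2.1)])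
    else st

-- B's final 'if tag_start < series_length: yield …' after the loop
def pvFinishB (s : List Char) (st : Int × Int × Bool × List (Int × Int × Int)) :
    List (Int × Int × Int) :=
  if st.1 < (s.length : Int) then st.2.2.2 ++ [(st.1, (s.length : Int), st.2.1)] else st.2.2.2

def iter_tag_ranges_py_alt (series_key : String) (start_index : Int) : List (Int × Int × Int) :=
  let s := series_key.toList
  pvFinishB s
    ((PySem.List.pyRange start_index (s.length : Int) 1).foldl (pvStepB s)
      (start_index, -1, false, []))

-- ===== PRECONDITION & SPEC =====
-- Pre_ excludes exactly the inputs where the Python A raises IndexError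
-- (start_index below -len(series_key)); B raises there too.
def Pre_iter_tag_ranges_py (series_key : String) (start_index : Int) : Prop :=
  -(PySem.Str.len series_key) ≤ start_index
instance (series_key : String) (start_index : Int) : Decidable (Pre_iter_tag_ranges_py series_key start_index) := by unfold Pre_iter_tag_ranges_py; infer_instance

def pvWitness_iter_tag_ranges_py : String × Int := ("a=1,b=2", 0)

def Spec_iter_tag_ranges_py (series_key : String) (start_index : Int) (out : List (Int × Int × Int)) : Prop := out = iter_tag_ranges_py_alt series_key start_index
instance (series_key : String) (start_index : Int) (out : List (Int × Int × Int)) : Decidable (Spec_iter_tag_ranges_py series_key start_index out) := by unfold Spec_iter_tag_ranges_py; infer_instance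

-- ===== CLAIM (what is proved, stated in full; the proofs are below) =====
def Claim_equal_iter_tag_ranges_py : Prop := ∀ (series_key : String) (start_index : Int), Dom_iter_tag_ranges_py series_key start_index → Pre_iter_tag_ranges_py series_key start_index → Spec_iter_tag_ranges_py series_key start_index (iter_tag_ranges_py series_key start_index)

-- ===== LEMMAS AND PROOFS =====

-- A's inner loop never moves the index left
theorem pvInnerA_ge (s : List Char) (fuel : Nat) (index : Int) (escaped : Bool) (sep : Int) :
    index ≤ (pvInnerA s fuel index escaped sep).1 := by
  fun_induction pvInnerA s fuel index escaped sep <;> simp_all <;> omega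

-- B's fold over [j, len) reproduces one run of A's inner loop: either it hits the comma
-- A breaks on (and continues folding from the next index with reset state), or A's inner
-- loop runs to the end and the fold only updated separator/escaped.
theorem pv_inner_fold (s : List Char) (ts : Int) (acc : List (Int × Int × Int))
    (fuel : Nat) (j : Int) (esc : Bool) (sep : Int) :
    -(s.length : Int) ≤ j → j ≤ (s.length : Int) → (s.length : Int) ≤ j + fuel →
    ((pvInnerA s fuel j esc sep).1 < (s.length : Int) ∧
      (PySem.List.pyRange j (s.length : Int) 1).foldl (pvStepB s) (ts, sep, esc, acc) =
        (PySem.List.pyRange ((pvInnerA s fuel j esc sep).1 + 1) (s.length : Int) 1).foldl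
          (pvStepB s) ((pvInnerA s fuel j esc sep).1 + 1, -1, false,
            acc ++ [(ts, (pvInnerA s fuel j esc sep).1, (pvInnerA s fuel j esc sep).2)])) ∨
    ((pvInnerA s fuel j esc sep).1 = (s.length : Int) ∧ ∃ e,
      (PySem.List.pyRange j (s.length : Int) 1).foldl (pvStepB s) (ts, sep, esc, acc) =
        (ts, (pvInnerA s fuel j esc sep).2, e, acc)) := by
  fun_induction pvInnerA s fuel j esc sep with
  | case1 index escaped sep =>
    -- fuel exhausted: with the exact fuel this is index = length
    intro _ hhi hfuel
    right
    refine ⟨by simp; omega, escaped, ?_⟩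
    rw [PySem.List.pyRange_one_eq_nil (by omega)]
    simp
  | case2 index escaped sep f h hc =>
    -- pyGet? = none while index < len: impossible once -len ≤ index
    intro hlo _ _
    exfalso
    have hni : ¬ PySem.Raise.InRange s.length index := by
      rw [← PySem.List.pyGet?_eq_none_iff (xs := s)]; exact hc
    simp [PySem.Raise.InRange] at hni
    omega
  | case3 index sep f h c hc ih =>
    -- escaped was true: drop it
    intro hlo hhi hfuel
    rw [PySem.List.pyRange_one_cons h]
    simp only [List.foldl_cons, pvStepB, hc]
    exact ih (by omega) (by omega) (by omega)
  | case4 index escaped sep f h hesc hc ih =>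
    -- unescaped backslash: set escaped
    intro hlo hhi hfuel
    simp only [Bool.not_eq_true] at hesc; subst hesc
    rw [PySem.List.pyRange_one_cons h]
    simp only [List.foldl_cons, pvStepB, hc, Bool.false_eq_true, if_false]
    exact ih (by omega) (by omega) (by omega)
  | case5 index escaped sep f h c hc hesc hbs heqs ih =>
    -- first unescaped '=': record the separator position
    intro hlo hhi hfuel
    simp only [Bool.not_eq_true] at hesc; subst hesc
    rw [PySem.List.pyRange_one_cons h]
    simp only [List.foldl_cons, pvStepB, hc, Bool.false_eq_true, if_false,
      if_neg hbs, if_pos heqs]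
    exact ih (by omega) (by omega) (by omega)
  | case6 index escaped sep f h hesc hc hbs heqs =>
    -- unescaped comma: the fold performs the yield and A's inner loop breaks here
    intro _ _ _
    left
    refine ⟨h, ?_⟩
    simp only [Bool.not_eq_true] at hesc; subst hesc
    rw [PySem.List.pyRange_one_cons h]
    simp only [List.foldl_cons, pvStepB, hc, Bool.false_eq_true, if_false,
      if_neg hbs, if_neg heqs]
    simp
  | case7 index escaped sep f h c hc hesc hbs heqs hcm ih =>
    -- ordinary character: both sides just advance
    intro hlo hhi hfuel
    simp only [Bool.not_eq_true] at hesc; subst hesc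
    rw [PySem.List.pyRange_one_cons h]
    simp only [List.foldl_cons, pvStepB, hc, Bool.false_eq_true, if_false,
      if_neg hbs, if_neg heqs, if_neg hcm]
    exact ih (by omega) (by omega) (by omega)
  | case8 index escaped sep f h =>
    -- index reached the end of the string
    intro _ hhi _
    right
    refine ⟨by simp; omega, escaped, ?_⟩
    rw [PySem.List.pyRange_one_eq_nil (by omega)]
    simp

-- the whole of B (fold + final yield) equals A's outer loop, for any accumulator prefix
theorem pv_outer (s : List Char) (fuel : Nat) (ts : Int) :
    ∀ acc, -(s.length : Int) ≤ ts → (s.length : Int) ≤ ts + fuel →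
    pvFinishB s ((PySem.List.pyRange ts (s.length : Int) 1).foldl (pvStepB s) (ts, -1, false, acc))
      = acc ++ pvOuterA s fuel ts := by
  fun_induction pvOuterA s fuel ts with
  | case1 tag_start =>
    -- fuel exhausted: with the exact fuel tag_start is already past the end
    intro acc _ hfuel
    rw [PySem.List.pyRange_one_eq_nil (by omega)]
    simp [pvFinishB]
    omega
  | case2 tag_start f h ih =>
    intro acc hlo hfuel
    rcases pv_inner_fold s tag_start acc ((s.length : Int) - tag_start).toNat tag_start
        false (-1) hlo (by omega) (by omega) with ⟨hi, heq⟩ | ⟨hi, e, heq⟩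
    · rw [heq, ih (acc ++ [(tag_start,
          (pvInnerA s ((s.length : Int) - tag_start).toNat tag_start false (-1)).1,
          (pvInnerA s ((s.length : Int) - tag_start).toNat tag_start false (-1)).2)])
          (by have := pvInnerA_ge s ((s.length : Int) - tag_start).toNat tag_start false (-1)
              omega)
          (by have := pvInnerA_ge s ((s.length : Int) - tag_start).toNat tag_start false (-1)
              omega)]
      simp
    · rw [heq]
      have h2 : ¬ (pvInnerA s ((s.length : Int) - tag_start).toNat tag_start false (-1)).1 + 1
          < (s.length : Int) := by omega
      have h3 : pvOuterA s f
          ((pvInnerA s ((s.length : Int) - tag_start).toNat tag_start false (-1)).1 + 1) = [] := by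
        cases f with
        | zero => rfl
        | succ f' => simp only [pvOuterA, if_neg h2]
      rw [h3]
      simp [pvFinishB, h, hi]
  | case3 tag_start f h =>
    intro acc _ _
    rw [PySem.List.pyRange_one_eq_nil (by omega)]
    simp [pvFinishB, h]

-- ===== VERDICT (by name: the statement is the Claim_ definition above) =====
theorem iter_tag_ranges_py_spec : Claim_equal_iter_tag_ranges_py := by
  intro series_key start_index _hdom hpre
  unfold Spec_iter_tag_ranges_py iter_tag_ranges_py iter_tag_ranges_py_alt
  have h : -(series_key.toList.length : Int) ≤ start_index := by
    have := hpre; simpa [Pre_iter_tag_ranges_py, PySem.Str.len] using this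
  rw [pv_outer series_key.toList ((series_key.toList.length : Int) - start_index).toNat
    start_index [] h (by omega)]
  simp
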